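-- pv_equiv track=rewrite | github.com/BlackNoodle/altudy | 귤 고르기/solution.py | solution
-- ===== SOURCE A (Python) =====
-- from collections import Counter
--
-- def solution(k, tangerine):
--     answer = 0
--     total = 0
--
--     # Counter를 이용해서 각 무게별로 몇 개의 귤이 있는지 카운트 합니다.
--     # 카운트한 결과에서 갯수가 많은 순으로 sort한 값을 리스트를 만든다.
--     values = sorted(Counter(tangerine).values(), reverse=True)
--
--     # 갯수가 많은 종류별로 더해가면서 원하는 갯수 이상인지를 판별하면 이상이 되었을 때 반복문을 break한다.
--     for v in values:
--         total += v
--         answer += 1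
--         if total >= k:
--             break
--
--     return answer
-- ===== SOURCE B (Python) =====
-- from collections import Counter
--
-- def solution(k, tangerine):
--     # Counting-sort on counts: bucket[c] = number of distinct weights occurring
--     # exactly c times; sweep c from len(tangerine) down to 1.
--     cnt = Counter(tangerine)
--     bucket = Counter(cnt.values())
--     answer = 0
--     total = 0
--     for c in range(len(tangerine), 0, -1):
--         for _ in range(bucket[c]):
--             total += c
--             answer += 1
--             if total >= k:
--                 return answer
--     return answer
-- ===== Notes on version B (the rewrite author's own statement) =====
-- stated objective: alternative
-- what changed: Replaces the comparison sort of the frequency values by a counting-sort bucket table (bucket[c] = number of weights occurring exactly c times) swept from len(tangerine) down to 1, with an early return instead of break.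
import Mathlib
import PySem

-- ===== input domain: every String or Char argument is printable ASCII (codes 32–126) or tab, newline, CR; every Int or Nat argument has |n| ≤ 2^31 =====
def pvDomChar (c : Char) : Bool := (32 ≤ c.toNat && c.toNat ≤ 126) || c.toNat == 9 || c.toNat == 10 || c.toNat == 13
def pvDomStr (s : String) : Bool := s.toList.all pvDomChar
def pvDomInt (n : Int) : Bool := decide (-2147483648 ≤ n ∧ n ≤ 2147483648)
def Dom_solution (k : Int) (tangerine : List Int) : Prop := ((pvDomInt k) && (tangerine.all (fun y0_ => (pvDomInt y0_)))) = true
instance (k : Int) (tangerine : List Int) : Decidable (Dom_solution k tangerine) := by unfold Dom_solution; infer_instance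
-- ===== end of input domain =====

-- B replaces the comparison sort of the frequency values by a counting-sort bucket table
-- swept from len(tangerine) down to 1 (objective: alternative algorithm, same result).

-- ===== PORT A =====
-- the 'for v in values: total += v; answer += 1; if total >= k: break' loop
def solutionLoop (k : Int) : List Int → Int → Int → Int
  | [], _, answer => answer
  | v :: vs, total, answer =>
    let total := total + v
    let answer := answer + 1
    if total ≥ k then answer else solutionLoop k vs total answer

def solution (k : Int) (tangerine : List Int) : Int :=
  let values := PySem.List.sorted (PySem.Dict.counter tangerine).values (fun x => x) true
  solutionLoop k values 0 0

-- ===== PORT B =====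
-- inner 'for _ in range(bucket[c]): total += c; answer += 1; if total >= k: return answer'
-- Sum.inl = fall through with the updated (total, answer); Sum.inr = early return
def innerB (k c : Int) : Nat → Int → Int → (Int × Int) ⊕ Int
  | 0, total, answer => Sum.inl (total, answer)
  | m + 1, total, answer =>
    let total := total + c
    let answer := answer + 1
    if total ≥ k then Sum.inr answer else innerB k c m total answer

-- outer 'for c in range(len(tangerine), 0, -1)'
def outerB (k : Int) (bucket : PySem.Dict Int Int) : List Int → Int → Int → Int
  | [], _, answer => answer
  | c :: cs, total, answer =>
    match innerB k c (bucket.getD c 0).toNat total answer with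
    | Sum.inl (t', a') => outerB k bucket cs t' a'
    | Sum.inr ans => ans

def solution_alt (k : Int) (tangerine : List Int) : Int :=
  let cnt := PySem.Dict.counter tangerine
  let bucket := PySem.Dict.counter cnt.values
  outerB k bucket (PySem.List.pyRange (tangerine.length : Int) 0 (-1)) 0 0

-- ===== PRECONDITION & SPEC =====
def Spec_solution (k : Int) (tangerine : List Int) (out : Int) : Prop := out = solution_alt k tangerine
instance (k : Int) (tangerine : List Int) (out : Int) : Decidable (Spec_solution k tangerine out) := by unfold Spec_solution; infer_instance

-- ===== CLAIM (what is proved, stated in full; the proofs are below) =====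
def Claim_equal_solution : Prop := ∀ (k : Int) (tangerine : List Int), Dom_solution k tangerine → Spec_solution k tangerine (solution k tangerine)

-- ===== LEMMAS AND PROOFS =====

-- A's loop as a state machine: inl = ran off the end with state, inr = broke with the answer
def runA (k : Int) : List Int → Int → Int → (Int × Int) ⊕ Int
  | [], total, answer => Sum.inl (total, answer)
  | v :: vs, total, answer =>
    if total + v ≥ k then Sum.inr (answer + 1) else runA k vs (total + v) (answer + 1)

theorem solutionLoop_eq_runA (k : Int) (l : List Int) (t a : Int) :
    solutionLoop k l t a = match runA k l t a with
      | Sum.inl (_, a') => a'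
      | Sum.inr ans => ans := by
  induction l generalizing t a with
  | nil => rfl
  | cons v vs ih =>
    simp only [solutionLoop, runA]
    split_ifs with h
    · rfl
    · exact ih _ _

theorem runA_append (k : Int) (xs ys : List Int) (t a : Int) :
    runA k (xs ++ ys) t a = match runA k xs t a with
      | Sum.inl (t', a') => runA k ys t' a'
      | Sum.inr ans => Sum.inr ans := by
  induction xs generalizing t a with
  | nil => rfl
  | cons v vs ih =>
    simp only [List.cons_append, runA]
    split_ifs with h
    · rfl
    · exact ih _ _

theorem innerB_eq_runA (k c : Int) (m : Nat) (t a : Int) :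
    innerB k c m t a = runA k (List.replicate m c) t a := by
  induction m generalizing t a with
  | zero => rfl
  | succ m ih =>
    simp only [innerB, List.replicate_succ, runA]
    split_ifs with h
    · rfl
    · exact ih _ _

theorem outerB_eq_loop (k : Int) (bucket : PySem.Dict Int Int) (cs : List Int) (t a : Int) :
    outerB k bucket cs t a
      = solutionLoop k (cs.flatMap (fun c => List.replicate (bucket.getD c 0).toNat c)) t a := by
  induction cs generalizing t a with
  | nil => rfl
  | cons c cs ih =>
    simp only [outerB, List.flatMap_cons, innerB_eq_runA]
    rw [solutionLoop_eq_runA, runA_append]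
    cases h : runA k (List.replicate (bucket.getD c 0).toNat c) t a with
    | inl p =>
      obtain ⟨t', a'⟩ := p
      simp only [ih, solutionLoop_eq_runA]
    | inr ans => rfl

theorem count_flat (cs : List Int) (m : Int → Nat) (hnd : cs.Nodup) (x : Int) :
    (cs.flatMap (fun c => List.replicate (m c) c)).count x = if x ∈ cs then m x else 0 := by
  induction cs with
  | nil => simp
  | cons c cs ih =>
    rcases List.nodup_cons.mp hnd with ⟨hc, hnd'⟩
    simp only [List.flatMap_cons, List.count_append, List.count_replicate, ih hnd', List.mem_cons]
    by_cases hx : x = c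
    · subst hx
      simp [hc]
    · simp [hx, Ne.symm hx]

theorem pairwise_flat (cs : List Int) (m : Int → Nat)
    (hp : cs.Pairwise (fun a b => b < a)) :
    (cs.flatMap (fun c => List.replicate (m c) c)).Pairwise (fun a b => -a ≤ -b) := by
  induction cs with
  | nil => simp
  | cons c cs ih =>
    rcases List.pairwise_cons.mp hp with ⟨hlt, hp'⟩
    simp only [List.flatMap_cons]
    apply List.pairwise_append.mpr
    refine ⟨?_, ih hp', ?_⟩
    · exact List.pairwise_replicate.mpr (Or.inr le_rfl)
    · intro a ha b hb
      have ha' : a = c := List.eq_of_mem_replicate ha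
      rcases List.mem_flatMap.mp hb with ⟨d, hd, hbr⟩
      have hb' : b = d := List.eq_of_mem_replicate hbr
      have := hlt d hd
      omega

theorem flat_eq_sorted (vals : List Int) (n : Int)
    (h : ∀ v ∈ vals, 1 ≤ v ∧ v ≤ n) :
    (PySem.List.pyRange n 0 (-1)).flatMap (fun c => List.replicate (vals.count c) c)
      = PySem.List.sorted vals (fun x => x) true := by
  have hnd : (PySem.List.pyRange n 0 (-1)).Nodup := by
    rw [PySem.List.pyRange_neg_one_eq_reverse]
    exact List.nodup_reverse.mpr (PySem.List.nodup_pyRange_one _ _)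
  have hperm : ((PySem.List.pyRange n 0 (-1)).flatMap
      (fun c => List.replicate (vals.count c) c)).Perm vals := by
    apply List.perm_iff_count.mpr
    intro x
    rw [count_flat _ _ hnd]
    by_cases hx : x ∈ vals
    · have := h x hx
      rw [if_pos]
      rw [PySem.List.mem_pyRange_neg_one]
      omega
    · have : vals.count x = 0 := List.count_eq_zero.mpr hx
      simp [this]
  apply PySem.List.eq_of_perm_of_pairwise_le_of_injective (key := fun x => -x) neg_injective
  · exact hperm.trans (PySem.List.sorted_perm vals (fun x => x) true).symm
  · apply pairwise_flat
    rw [PySem.List.pyRange_neg_one_eq_reverse, List.pairwise_reverse]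
    exact PySem.List.pairwise_lt_pyRange_one _ _
  · exact (PySem.List.sorted_pairwise_rev vals (fun x => x)).imp (by intro a b hba; omega)

theorem vals_bounds (tangerine : List Int) :
    ∀ v ∈ (PySem.Dict.counter tangerine).values, 1 ≤ v ∧ v ≤ (tangerine.length : Int) := by
  intro v hv
  have : (PySem.Dict.counter tangerine).values
      = (PySem.Set.ofList tangerine).map (fun c => ((tangerine.count c : Nat) : Int)) := by
    show ((PySem.Dict.counter tangerine).items.map (·.2)) = _
    rw [PySem.Dict.items_counter]
    simp [List.map_map, Function.comp]
  rw [this] at hv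
  rcases List.mem_map.mp hv with ⟨c, hc, rfl⟩
  have hcmem : c ∈ tangerine := (PySem.Set.mem_ofList _ _).mp hc
  have h1 : 1 ≤ tangerine.count c := List.count_pos_iff.mpr hcmem
  have h2 : tangerine.count c ≤ tangerine.length := List.count_le_length
  omega

-- ===== VERDICT (by name: the statement is the Claim_ definition above) =====
theorem solution_spec : Claim_equal_solution := by
  intro k tangerine _
  show solution k tangerine = solution_alt k tangerine
  simp only [solution, solution_alt]
  rw [outerB_eq_loop]
  have hfun : (fun c => List.replicate
        ((PySem.Dict.counter (PySem.Dict.counter tangerine).values).getD c 0).toNat c)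
      = fun c => List.replicate ((PySem.Dict.counter tangerine).values.count c) c := by
    funext c
    rw [PySem.Dict.getD_counter]
    simp
  rw [hfun, flat_eq_sorted _ _ (vals_bounds tangerine)]
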